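-- pv_equiv track=rewrite | github.com/acarokan/MyESClone | external.py | set_new_name
-- ===== SOURCE A (Python) =====
-- def set_new_name(gen, name):
--     count = len(gen)
--     iter = 0
--     inner_iter = 0
--     file_name = name
--     while iter < count:
--         if file_name == gen[iter]:
--             inner_iter +=1
--             file_name = name + "({})".format(str(inner_iter))
--             iter = 0
--         else:
--             iter +=1
--
--     return file_name
-- ===== SOURCE B (Python) =====
-- def set_new_name(gen, name):
--     # One pass: collect the suffix strings s of entries of the form name + "(" + s + ")",
--     # then find the first candidate index whose printed form is not taken.
--     prefix = name + "("
--     suffixes = {g[:-1][len(prefix):] for g in gen if g.startswith(prefix) and g.endswith(")")}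
--     if name not in gen:
--         return name
--     n = 1
--     while str(n) in suffixes:
--         n += 1
--     return prefix + str(n) + ")"
-- ===== Notes on version B (the rewrite author's own statement) =====
-- stated objective: alternative
-- what changed: A's scan-and-restart while-loop (rescan gen from index 0 after every collision) is replaced by one pass that collects the suffix strings of entries of the form name+'('+s+')' into a set, followed by a search for the first candidate index whose printed form is not taken.
import Mathlib
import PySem

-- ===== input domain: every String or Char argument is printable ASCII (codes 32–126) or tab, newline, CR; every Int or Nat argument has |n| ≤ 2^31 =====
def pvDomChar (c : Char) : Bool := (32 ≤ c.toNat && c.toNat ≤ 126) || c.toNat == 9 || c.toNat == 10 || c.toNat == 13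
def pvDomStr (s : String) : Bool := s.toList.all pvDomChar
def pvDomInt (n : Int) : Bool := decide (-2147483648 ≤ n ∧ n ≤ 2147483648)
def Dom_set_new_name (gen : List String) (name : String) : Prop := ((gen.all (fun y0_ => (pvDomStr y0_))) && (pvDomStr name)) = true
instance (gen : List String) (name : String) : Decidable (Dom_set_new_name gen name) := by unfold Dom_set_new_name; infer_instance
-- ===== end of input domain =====

-- B replaces A's scan-and-restart search with one suffix-collecting pass over gen followed by a
-- first-free-index search (objective: alternative decomposition).

-- ===== PORT A =====
-- A's while-loop: state (iter, inner_iter, file_name); the fuel argument only makes the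
-- recursion total (the 0-fuel branch is proved unreachable below).
def snnLoop (gen : List String) (name : String) : Nat → Nat → Nat → String → String
  | 0, _, _, file_name => file_name
  | fuel+1, iter, inner_iter, file_name =>
    if iter < gen.length then
      if file_name == PySem.List.pyGetD gen (iter : Int) "" then
        snnLoop gen name fuel 0 (inner_iter+1)
          (name ++ "(" ++ PySem.Int.toStr ((inner_iter+1 : Nat) : Int) ++ ")")
      else
        snnLoop gen name fuel (iter+1) inner_iter file_name
    else file_name

def set_new_name (gen : List String) (name : String) : String :=
  snnLoop gen name ((gen.length + 1) * (gen.length + 1)) 0 0 name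

-- ===== PORT B =====
-- B's while-loop: first n ≥ start whose printed form is not a collected suffix
-- (fuel is only a totality guard, proved unreachable below).
def snnAltLoop (suffixes : List String) : Nat → Nat → Nat
  | 0, n => n
  | fuel+1, n =>
    if suffixes.contains (PySem.Int.toStr (n : Int)) then snnAltLoop suffixes fuel (n+1) else n

def set_new_name_alt (gen : List String) (name : String) : String :=
  let pfx := name ++ "("
  let suffixes : PySem.Set String :=
    PySem.Set.ofList
      ((gen.filter (fun g => PySem.Str.startswith g pfx && PySem.Str.endswith g ")")).map
        (fun g => PySem.Str.slice (PySem.Str.slice g none (some (-1)))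
                    (some (PySem.Str.len pfx)) none))
  if gen.contains name = false then name
  else
    let n := snnAltLoop suffixes (suffixes.length + 1) 1
    pfx ++ PySem.Int.toStr (n : Int) ++ ")"

-- ===== PRECONDITION & SPEC =====
def Spec_set_new_name (gen : List String) (name : String) (out : String) : Prop := out = set_new_name_alt gen name
instance (gen : List String) (name : String) (out : String) : Decidable (Spec_set_new_name gen name out) := by unfold Spec_set_new_name; infer_instance

-- ===== CLAIM (what is proved, stated in full; the proofs are below) =====
def Claim_equal_set_new_name : Prop := ∀ (gen : List String) (name : String), Dom_set_new_name gen name → Spec_set_new_name gen name (set_new_name gen name)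

-- ===== LEMMAS AND PROOFS =====

-- the n-th candidate file name: name, name(1), name(2), …
def cand (name : String) (n : Nat) : String :=
  if n = 0 then name else name ++ "(" ++ PySem.Int.toStr (n : Int) ++ ")"

-- the suffix B extracts from an entry of the form name + "(" + s + ")"
def sfx (name : String) (g : String) : String :=
  PySem.Str.slice (PySem.Str.slice g none (some (-1)))
    (some (PySem.Str.len (name ++ "("))) none

-- str(n) for n > 0 prints the base-10 digit list, most significant first
theorem toDigitsCore_eq_digits : ∀ (fuel n : Nat) (ds : List Char), 0 < n → n < fuel →
    Nat.toDigitsCore 10 fuel n ds = ((Nat.digits 10 n).map Nat.digitChar).reverse ++ ds := by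
  intro fuel
  induction fuel with
  | zero => intro n ds h1 h2; omega
  | succ f ih =>
    intro n ds h1 h2
    rw [Nat.toDigitsCore]
    by_cases hz : n / 10 = 0
    · rw [if_pos hz]
      rw [Nat.digits_def' (by norm_num : 2 ≤ 10) h1, hz, Nat.digits_zero]
      simp
    · rw [if_neg hz]
      have hlt : n / 10 < n := Nat.div_lt_self h1 (by norm_num)
      rw [ih (n / 10) _ (Nat.pos_of_ne_zero hz) (by omega)]
      rw [Nat.digits_def' (by norm_num : 2 ≤ 10) h1]
      simp

theorem toChars_nat_pos (n : Nat) (h : 0 < n) :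
    PySem.Int.toChars (n : Int) = ((Nat.digits 10 n).map Nat.digitChar).reverse := by
  rw [PySem.Int.toChars]
  rw [if_neg (by omega)]
  simp only [Int.toNat_natCast]
  rw [Nat.toDigits, toDigitsCore_eq_digits (n+1) n [] h (by omega)]
  simp

theorem digitChar_inj {a b : Nat} (ha : a < 10) (hb : b < 10)
    (h : Nat.digitChar a = Nat.digitChar b) : a = b := by
  interval_cases a <;> interval_cases b <;> simp_all [Nat.digitChar]

theorem toStr_nat_inj {a b : Nat} (ha : 0 < a) (hb : 0 < b)
    (h : PySem.Int.toStr (a : Int) = PySem.Int.toStr (b : Int)) : a = b := by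
  have hc : PySem.Int.toChars (a : Int) = PySem.Int.toChars (b : Int) := by
    have := congrArg String.toList h
    simpa [PySem.Int.toList_toStr] using this
  rw [toChars_nat_pos a ha, toChars_nat_pos b hb] at hc
  have hmap : (Nat.digits 10 a).map Nat.digitChar = (Nat.digits 10 b).map Nat.digitChar :=
    List.reverse_injective hc
  have hdig : Nat.digits 10 a = Nat.digits 10 b := by
    have h1 : ((Nat.digits 10 a).map Nat.digitChar).length
        = ((Nat.digits 10 b).map Nat.digitChar).length := by rw [hmap]
    simp only [List.length_map] at h1
    apply List.ext_getElem h1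
    intro i hi1 hi2
    have h2 : ((Nat.digits 10 a).map Nat.digitChar)[i]'(by simpa)
        = ((Nat.digits 10 b).map Nat.digitChar)[i]'(by simpa) := List.getElem_of_eq hmap _
    simp only [List.getElem_map] at h2
    exact digitChar_inj (Nat.digits_lt_base (by norm_num) (List.getElem_mem _))
      (Nat.digits_lt_base (by norm_num) (List.getElem_mem _)) h2
  calc a = Nat.ofDigits 10 (Nat.digits 10 a) := (Nat.ofDigits_digits 10 a).symm
    _ = Nat.ofDigits 10 (Nat.digits 10 b) := by rw [hdig]
    _ = b := Nat.ofDigits_digits 10 b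

theorem pfx_toList (name : String) : (name ++ "(").toList = name.toList ++ ['('] := by
  simp [String.toList_append]

theorem cand_toList (name : String) (n : Nat) (h : 0 < n) :
    (cand name n).toList = name.toList ++ '(' :: (PySem.Int.toChars (n : Int) ++ [')']) := by
  rw [cand, if_neg (by omega)]
  simp [String.toList_append, PySem.Int.toList_toStr]

theorem cand_zero (name : String) : cand name 0 = name := by rw [cand, if_pos rfl]

theorem cand_inj (name : String) {m n : Nat} (h : cand name m = cand name n) : m = n := by
  have hl := congrArg String.toList h
  rcases Nat.eq_zero_or_pos m with hm | hm <;> rcases Nat.eq_zero_or_pos n with hn | hn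
  · omega
  · exfalso
    subst hm
    rw [cand_zero, cand_toList name n hn] at hl
    have := congrArg List.length hl
    simp at this
  · exfalso
    subst hn
    rw [cand_zero, cand_toList name m hm] at hl
    have := congrArg List.length hl
    simp at this
  · rw [cand_toList name m hm, cand_toList name n hn] at hl
    have h1 := List.append_cancel_left hl
    have h2 : PySem.Int.toChars (m : Int) ++ [')'] = PySem.Int.toChars (n : Int) ++ [')'] :=
      List.cons_injective h1
    have h3 := List.append_cancel_right h2
    exact toStr_nat_inj hm hn (by rw [PySem.Int.toStr, PySem.Int.toStr, h3])

theorem exists_cand_notin (gen : List String) (name : String) :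
    ∃ n, n ≤ gen.length ∧ cand name n ∉ gen := by
  by_contra hc
  push Not at hc
  have hsub : ((List.range (gen.length + 1)).map (cand name)) ⊆ gen := by
    intro x hx
    simp only [List.mem_map, List.mem_range] at hx
    obtain ⟨n, hn, rfl⟩ := hx
    exact hc n (by omega)
  have hnd : ((List.range (gen.length + 1)).map (cand name)).Nodup :=
    (List.nodup_range).map (fun a b hab => cand_inj name hab)
  have := (List.Nodup.subperm hnd hsub).length_le
  simp at this

theorem mem_iff_getD (gen : List String) (x : String) :
    x ∈ gen ↔ ∃ j < gen.length, gen.getD j "" = x := by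
  constructor
  · intro hx
    obtain ⟨j, hj, hx⟩ := List.getElem_of_mem hx
    exact ⟨j, hj, by rw [List.getD_eq_getElem _ _ hj, hx]⟩
  · rintro ⟨j, hj, rfl⟩
    rw [List.getD_eq_getElem _ _ hj]
    exact List.getElem_mem hj

theorem cand_succ (name : String) (k : Nat) :
    name ++ "(" ++ PySem.Int.toStr ((k+1 : Nat) : Int) ++ ")" = cand name (k+1) := by
  rw [cand, if_neg (by omega)]

-- A's loop returns the first candidate not in gen
theorem snnLoop_eq (gen : List String) (name : String) (N : Nat)
    (hN : cand name N ∉ gen) (hmin : ∀ m < N, cand name m ∈ gen) :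
    ∀ fuel i k, (∀ j < i, gen.getD j "" ≠ cand name k) → (∀ m < k, cand name m ∈ gen) →
      gen.length - i + (N - k) * (gen.length + 1) < fuel →
      snnLoop gen name fuel i k (cand name k) = cand name N := by
  intro fuel
  induction fuel with
  | zero => intro i k _ _ hf; omega
  | succ f ih =>
    intro i k hscan hbelow hf
    rw [snnLoop]
    by_cases hi : i < gen.length
    · rw [if_pos hi]
      by_cases heq : cand name k = gen.getD i ""
      · have hbeq : (cand name k == PySem.List.pyGetD gen (i : Int) "") = true := by
          simp only [PySem.List.pyGetD_natCast, beq_iff_eq]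
          exact heq
        rw [if_pos hbeq]
        have hkmem : cand name k ∈ gen := by
          rw [mem_iff_getD]; exact ⟨i, hi, heq.symm⟩
        have hkN : k < N := by
          rcases Nat.lt_trichotomy k N with h | h | h
          · exact h
          · exact absurd (h ▸ hkmem) hN
          · exact absurd (hbelow N h) hN
        rw [cand_succ]
        apply ih
        · intro j hj; omega
        · intro m hm
          rcases Nat.lt_or_ge m k with h | h
          · exact hbelow m h
          · have : m = k := by omega
            rw [this]; exact hkmem
        · have hsplit : (N - k) * (gen.length + 1)
              = (N - (k+1)) * (gen.length + 1) + (gen.length + 1) := by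
            rw [show N - k = (N - (k+1)) + 1 by omega, Nat.add_mul, Nat.one_mul]
          omega
      · have hbeq : (cand name k == PySem.List.pyGetD gen (i : Int) "") = false := by
          simp only [PySem.List.pyGetD_natCast, beq_eq_false_iff_ne, ne_eq]
          exact heq
        rw [if_neg (ne_true_of_eq_false hbeq)]
        apply ih
        · intro j hj
          rcases Nat.lt_or_ge j i with h | h
          · exact hscan j h
          · have : j = i := by omega
            rw [this]; exact fun hh => heq hh.symm
        · exact hbelow
        · omega
    · rw [if_neg hi]
      have hknot : cand name k ∉ gen := by
        rw [mem_iff_getD]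
        rintro ⟨j, hj, hjx⟩
        exact hscan j (by omega) hjx
      have : k = N := by
        rcases Nat.lt_trichotomy k N with h | h | h
        · exact absurd (hmin k h) hknot
        · exact h
        · exact absurd (hbelow N h) hN
      rw [this]

theorem set_new_name_eq_cand (gen : List String) (name : String) (N : Nat)
    (hN : cand name N ∉ gen) (hmin : ∀ m < N, cand name m ∈ gen) :
    set_new_name gen name = cand name N := by
  have hNle : N ≤ gen.length := by
    have hsub : ((List.range N).map (cand name)) ⊆ gen := by
      intro x hx
      simp only [List.mem_map, List.mem_range] at hx
      obtain ⟨m, hm, rfl⟩ := hx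
      exact hmin m hm
    have hnd : ((List.range N).map (cand name)).Nodup :=
      (List.nodup_range).map (fun a b hab => cand_inj name hab)
    have := (List.Nodup.subperm hnd hsub).length_le
    simpa using this
  rw [set_new_name, ← cand_zero name]
  apply snnLoop_eq gen name N hN hmin
  · omega
  · omega
  · simp only [Nat.sub_zero]
    have h1 : N * (gen.length + 1) ≤ gen.length * (gen.length + 1) :=
      Nat.mul_le_mul_right _ hNle
    have h2 : (gen.length + 1) * (gen.length + 1)
        = gen.length * (gen.length + 1) + (gen.length + 1) := by ring
    omega

theorem sfx_toList (name g : String) :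
    (sfx name g).toList = (g.toList.dropLast).drop (name ++ "(").toList.length := by
  have h1 : PySem.Str.len (name ++ "(") = (((name ++ "(").toList.length : Nat) : Int) := by
    simp [String.length_toList]
  rw [sfx, h1]
  simp only [PySem.Str.toList_slice, PySem.Chars.slice_eq_listSlice]
  rw [PySem.List.slice_to_neg_one, PySem.List.slice_from_natCast]

theorem sfx_cand (name : String) (n : Nat) (h : 0 < n) :
    sfx name (cand name n) = PySem.Int.toStr (n : Int) := by
  rw [← String.toList_inj, sfx_toList, cand_toList name n h, PySem.Int.toList_toStr]
  rw [show name.toList ++ '(' :: (PySem.Int.toChars (n : Int) ++ [')'])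
      = ((name ++ "(").toList ++ PySem.Int.toChars (n : Int)) ++ [')'] by simp]
  rw [List.dropLast_concat, List.drop_left]

theorem cand_of_parse (name g : String) (n : Nat) (hn : 0 < n)
    (h1 : PySem.Str.startswith g (name ++ "(") = true)
    (h2 : PySem.Str.endswith g ")" = true)
    (h3 : sfx name g = PySem.Int.toStr (n : Int)) : g = cand name n := by
  rw [PySem.Str.startswith_eq] at h1
  rw [PySem.Str.endswith_eq] at h2
  obtain ⟨t, ht⟩ := (PySem.Chars.startswith_iff _ _).mp h1
  obtain ⟨s, hs⟩ := (PySem.Chars.endswith_iff _ _).mp h2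
  have h9 : (")" : String).toList = [')'] := by decide
  rw [h9] at hs
  rcases List.eq_nil_or_concat t with rfl | ⟨t', c, rfl⟩
  · exfalso
    have hx : s ++ [')'] = name.toList ++ ['('] := by
      rw [hs, ← ht]; simp
    have := (List.append_singleton_inj.mp hx).2
    simp at this
  · simp only [List.concat_eq_append] at ht
    have hx : (((name ++ "(").toList ++ t') ++ [c]) = s ++ [')'] := by
      rw [hs, ← ht]; simp
    have hc : c = ')' := (List.append_singleton_inj.mp hx).2
    have hg : g.toList = ((name ++ "(").toList ++ t') ++ [')'] := by
      rw [← ht, hc]; simp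
    have hsfx := congrArg String.toList h3
    rw [sfx_toList, hg, List.dropLast_concat, List.drop_left, PySem.Int.toList_toStr] at hsfx
    rw [← String.toList_inj, cand_toList name n hn, hg, ← hsfx, pfx_toList]
    simp

-- membership in B's suffix set is membership of the candidate in gen
theorem mem_suffixes_iff (gen : List String) (name : String) (n : Nat) (hn : 0 < n) :
    PySem.Int.toStr (n : Int) ∈
      ((gen.filter (fun g => PySem.Str.startswith g (name ++ "(") && PySem.Str.endswith g ")")).map
        (fun g => sfx name g)) ↔
      cand name n ∈ gen := by
  constructor
  · intro hx
    obtain ⟨g, hgf, hfg⟩ := List.mem_map.mp hx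
    obtain ⟨hg, hcond⟩ := List.mem_filter.mp hgf
    obtain ⟨h1, h2⟩ := Bool.and_eq_true_iff.mp hcond
    rw [← cand_of_parse name g n hn h1 h2 hfg]
    exact hg
  · intro hx
    apply List.mem_map.mpr
    refine ⟨cand name n, List.mem_filter.mpr ⟨hx, ?_⟩, sfx_cand name n hn⟩
    have h1 : PySem.Str.startswith (cand name n) (name ++ "(") = true := by
      rw [PySem.Str.startswith_eq]
      apply (PySem.Chars.startswith_iff _ _).mpr
      refine ⟨PySem.Int.toChars (n : Int) ++ [')'], ?_⟩
      rw [cand_toList name n hn, pfx_toList]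
      simp
    have h2 : PySem.Str.endswith (cand name n) ")" = true := by
      rw [PySem.Str.endswith_eq]
      apply (PySem.Chars.endswith_iff _ _).mpr
      refine ⟨name.toList ++ '(' :: PySem.Int.toChars (n : Int), ?_⟩
      rw [cand_toList name n hn]
      simp [show (")" : String).toList = [')'] from by decide]
    rw [h1, h2]; rfl

-- B's loop returns the first index from n whose printed form is not a suffix
theorem snnAltLoop_eq (suffixes : List String) (M : Nat) :
    ∀ fuel n, n ≤ M → (∀ m, n ≤ m → m < M → PySem.Int.toStr (m : Int) ∈ suffixes) →
      PySem.Int.toStr (M : Int) ∉ suffixes → M - n < fuel →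
      snnAltLoop suffixes fuel n = M := by
  intro fuel
  induction fuel with
  | zero => intro n _ _ _ hf; omega
  | succ f ih =>
    intro n hnM hmem hnotin hf
    rw [snnAltLoop]
    by_cases hn : n = M
    · subst hn
      rw [if_neg (by simp only [List.contains_iff_mem]; exact fun h => hnotin (by simpa using h))]
    · have hin : PySem.Int.toStr (n : Int) ∈ suffixes := hmem n le_rfl (by omega)
      rw [if_pos (by simp only [List.contains_iff_mem]; simpa using hin)]
      exact ih (n+1) (by omega) (fun m h1 h2 => hmem m (by omega) h2) hnotin (by omega)

theorem set_new_name_alt_eq_cand (gen : List String) (name : String) (N : Nat)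
    (hN : cand name N ∉ gen) (hmin : ∀ m < N, cand name m ∈ gen) :
    set_new_name_alt gen name = cand name N := by
  rw [set_new_name_alt]
  by_cases hname : name ∈ gen
  · rw [if_neg (by simp [hname])]
    have hN0 : 0 < N := by
      rcases Nat.eq_zero_or_pos N with h | h
      · exact absurd (h ▸ cand_zero name ▸ hname) (h ▸ hN)
      · exact h
    have hslam : (fun g => PySem.Str.slice (PySem.Str.slice g none (some (-1)))
                    (some (PySem.Str.len (name ++ "("))) none) = fun g => sfx name g := rfl
    rw [hslam]
    set L := ((gen.filter (fun g => PySem.Str.startswith g (name ++ "(") && PySem.Str.endswith g ")")).map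
        (fun g => sfx name g)) with hL
    have hmem : ∀ m, 1 ≤ m → m < N →
        PySem.Int.toStr (m : Int) ∈ (PySem.Set.ofList L : List String) := by
      intro m h1 h2
      rw [PySem.Set.mem_ofList]
      exact (mem_suffixes_iff gen name m (by omega)).mpr (hmin m h2)
    have hnot : PySem.Int.toStr (N : Int) ∉ (PySem.Set.ofList L : List String) := by
      rw [PySem.Set.mem_ofList]
      exact fun h => hN ((mem_suffixes_iff gen name N hN0).mp h)
    have hbound : N - 1 < (PySem.Set.ofList L : List String).length + 1 := by
      have hsub : ((List.range' 1 (N-1)).map (fun m : Nat => PySem.Int.toStr (m : Int)))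
          ⊆ (PySem.Set.ofList L : List String) := by
        intro x hx
        simp only [List.mem_map, List.mem_range'] at hx
        obtain ⟨m, hm, rfl⟩ := hx
        exact hmem m (by omega) (by omega)
      have hnd : ((List.range' 1 (N-1)).map (fun m : Nat => PySem.Int.toStr (m : Int))).Nodup := by
        apply List.Nodup.map_on ?_ (List.nodup_range' ..)
        intro a ha b hb hab
        rw [List.mem_range'] at ha hb
        exact toStr_nat_inj (by omega) (by omega) hab
      have := (List.Nodup.subperm hnd hsub).length_le
      simpa using this
    rw [snnAltLoop_eq _ N _ 1 hN0 hmem hnot hbound]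
    rw [cand, if_neg (by omega)]
  · rw [if_pos (by simp [hname])]
    have : N = 0 := by
      by_contra h
      exact hname (cand_zero name ▸ hmin 0 (by omega))
    rw [this, cand_zero]

-- ===== VERDICT (by name: the statement is the Claim_ definition above) =====
theorem set_new_name_spec : Claim_equal_set_new_name := by
  intro gen name _dom
  unfold Spec_set_new_name
  obtain ⟨n0, _, hn0⟩ := exists_cand_notin gen name
  have hex : ∃ n, cand name n ∉ gen := ⟨n0, hn0⟩
  have hN := Nat.find_spec hex
  have hmin : ∀ m < Nat.find hex, cand name m ∈ gen := by
    intro m hm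
    by_contra hc
    exact absurd (Nat.find_min' hex hc) (by omega)
  rw [set_new_name_eq_cand gen name _ hN hmin, set_new_name_alt_eq_cand gen name _ hN hmin]
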